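-- pv_equiv track=rewrite | github.com/Temirlaaan/terraform-vcd | backend/app/core/state_to_hcl.py | _find_unquoted
-- ===== SOURCE A (Python) =====
-- def _find_unquoted(s: str, needle: str) -> int:
--     """Find ``needle`` outside of double-quoted strings. Return -1 if absent."""
--     in_str = False
--     i = 0
--     n = len(s)
--     nl = len(needle)
--     while i < n:
--         ch = s[i]
--         if in_str:
--             if ch == "\\" and i + 1 < n:
--                 i += 2
--                 continue
--             if ch == '"':
--                 in_str = False
--             i += 1
--             continue
--         if ch == '"':
--             in_str = True
--             i += 1
--             continue
--         if s[i : i + nl] == needle: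
--             return i
--         i += 1
--     return -1
-- ===== SOURCE B (Python) =====
-- def _find_unquoted(s: str, needle: str) -> int:
--     """Find ``needle`` outside of double-quoted strings. Return -1 if absent."""
--     n = len(s)
--     pos = 0
--     while True:
--         q = s.find('"', pos)
--         if q == -1:
--             q = n
--         cand = s.find(needle, pos)
--         if cand != -1 and cand < q:
--             return cand
--         if q == n:
--             return -1
--         # skip the quoted string starting at q, honouring backslash escapes
--         j = q + 1
--         while j < n:
--             c = s[j]
--             if c == '\\' and j + 1 < n:
--                 j += 2
--             elif c == '"':
--                 break
--             else:
--                 j += 1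
--         if j >= n:
--             return -1
--         pos = j + 1
-- ===== Notes on version B (the rewrite author's own statement) =====
-- stated objective: faster
-- what changed: Replaces A's per-character boolean state machine with a region-jumping loop: str.find locates the next quote and the next needle candidate in the current unquoted region, and an inner escape-aware scan skips whole quoted spans.
import Mathlib
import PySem

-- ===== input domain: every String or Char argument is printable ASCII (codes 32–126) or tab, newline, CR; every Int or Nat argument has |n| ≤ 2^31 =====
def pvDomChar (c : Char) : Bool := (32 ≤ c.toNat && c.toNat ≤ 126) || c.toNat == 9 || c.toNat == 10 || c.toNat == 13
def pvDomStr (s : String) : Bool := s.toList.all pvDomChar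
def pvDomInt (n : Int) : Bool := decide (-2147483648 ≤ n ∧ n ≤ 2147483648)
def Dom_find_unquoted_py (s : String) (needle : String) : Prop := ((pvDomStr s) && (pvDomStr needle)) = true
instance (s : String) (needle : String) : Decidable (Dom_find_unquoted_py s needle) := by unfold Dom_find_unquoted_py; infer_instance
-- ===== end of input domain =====

-- B replaces A's per-character state machine by a region-jumping search (str.find for the next quote /
-- next needle candidate, skip quoted spans); objective: faster (constant-factor, measured).

-- ===== PORT A =====
-- A's while-loop; fuel = n+1 bounds the iterations (i strictly increases each step).
def loopA (cs nd : List Char) : Nat → Bool → Nat → Int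
  | 0, _, _ => -1
  | f+1, inStr, i =>
    if i < cs.length then
      let ch := cs.getD i ' '
      if inStr then
        if ch = '\\' ∧ i + 1 < cs.length then loopA cs nd f true (i+2)
        else if ch = '"' then loopA cs nd f false (i+1)
        else loopA cs nd f true (i+1)
      else if ch = '"' then loopA cs nd f true (i+1)
      else if (cs.drop i).take nd.length = nd then (i : Int)
      else loopA cs nd f false (i+1)
    else -1

def find_unquoted_py (s : String) (needle : String) : Int :=
  loopA s.toList needle.toList (s.toList.length + 1) false 0

-- ===== PORT B =====
-- str.find(sub, pos): first index ≥ pos where sub occurs, else -1 (hand port of the library call).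
def findAux (cs nd : List Char) : Nat → Nat → Int
  | 0, _ => -1
  | f+1, i =>
    if i + nd.length ≤ cs.length then
      if (cs.drop i).take nd.length = nd then (i : Int)
      else findAux cs nd f (i+1)
    else -1

def findFrom (cs nd : List Char) (pos : Nat) : Int :=
  if pos ≤ cs.length then findAux cs nd (cs.length + 1 - pos) pos else -1

-- B's inner escape-aware skip over a quoted span; returns the index of the closing quote (or ≥ n).
def skipQ (cs : List Char) : Nat → Nat → Nat
  | 0, j => j
  | f+1, j =>
    if j < cs.length then
      let c := cs.getD j ' '
      if c = '\\' ∧ j + 1 < cs.length then skipQ cs f (j+2)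
      else if c = '"' then j
      else skipQ cs f (j+1)
    else j

-- B's outer loop: pos strictly increases, so fuel n+1 suffices.
def loopB (cs nd : List Char) : Nat → Nat → Int
  | 0, _ => -1
  | f+1, pos =>
    let q := findFrom cs ['"'] pos
    let qN : Nat := if q = -1 then cs.length else q.toNat
    let cand := findFrom cs nd pos
    if cand ≠ -1 ∧ cand < (qN : Int) then cand
    else if qN = cs.length then -1
    else
      let j := skipQ cs (cs.length - qN) (qN + 1)
      if j ≥ cs.length then -1 else loopB cs nd f (j + 1)

def find_unquoted_py_alt (s : String) (needle : String) : Int :=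
  loopB s.toList needle.toList (s.toList.length + 1) 0

-- ===== PRECONDITION & SPEC =====
def Spec_find_unquoted_py (s : String) (needle : String) (out : Int) : Prop := out = find_unquoted_py_alt s needle
instance (s : String) (needle : String) (out : Int) : Decidable (Spec_find_unquoted_py s needle out) := by unfold Spec_find_unquoted_py; infer_instance

-- ===== CLAIM (what is proved, stated in full; the proofs are below) =====
def Claim_equal_find_unquoted_py : Prop := ∀ (s : String) (needle : String), Dom_find_unquoted_py s needle → Spec_find_unquoted_py s needle (find_unquoted_py s needle)

-- ===== LEMMAS AND PROOFS =====

lemma skipQ_ge (cs : List Char) : ∀ f j, j ≤ skipQ cs f j := by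
  intro f
  induction f with
  | zero => intro j; simp [skipQ]
  | succ f ih =>
    intro j
    simp only [skipQ]
    split_ifs with h1 h2 h3
    · exact le_trans (by omega) (ih (j+2))
    · exact le_refl j
    · exact le_trans (by omega) (ih (j+1))
    · exact le_refl j

lemma loopA_ge (cs nd : List Char) : ∀ f b i, cs.length ≤ i → loopA cs nd f b i = -1 := by
  intro f b i h
  cases f with
  | zero => rfl
  | succ f => simp [loopA, show ¬ i < cs.length by omega]

lemma matchAt_le (cs nd : List Char) (i : Nat) (hi : i < cs.length)
    (hm : (cs.drop i).take nd.length = nd) : i + nd.length ≤ cs.length := by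
  have := congrArg List.length hm
  simp [List.length_take, List.length_drop] at this
  omega

lemma findAux_out (cs nd : List Char) (f i : Nat) (h : cs.length < i + nd.length) :
    findAux cs nd f i = -1 := by
  cases f with
  | zero => rfl
  | succ f => simp [findAux, show ¬ i + nd.length ≤ cs.length by omega]

lemma findAux_ge (cs nd : List Char) : ∀ f i, findAux cs nd f i ≠ -1 → (i : Int) ≤ findAux cs nd f i := by
  intro f
  induction f with
  | zero => intro i h; simp [findAux] at h
  | succ f ih =>
    intro i h
    simp only [findAux] at h ⊢
    split_ifs with h1 h2
    · exact le_refl _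
    · simp only [h1, if_pos, h2] at h
      have := ih (i+1) (by simpa using h)
      push_cast at this ⊢
      omega
    · simp [h1] at h

lemma findAux_match (cs nd : List Char) (f i : Nat) (hle : i + nd.length ≤ cs.length)
    (hm : (cs.drop i).take nd.length = nd) : findAux cs nd (f+1) i = i := by
  simp [findAux, hle, hm]

lemma findAux_next (cs nd : List Char) (f i : Nat) (hm : (cs.drop i).take nd.length ≠ nd) :
    findAux cs nd (f+1) i = findAux cs nd f (i+1) := by
  by_cases hle : i + nd.length ≤ cs.length
  · simp [findAux, hle, hm]
  · rw [findAux_out cs nd _ i (by omega), findAux_out cs nd f (i+1) (by omega)]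

lemma findFrom_ge (cs nd : List Char) (pos : Nat) (h : findFrom cs nd pos ≠ -1) :
    (pos : Int) ≤ findFrom cs nd pos := by
  unfold findFrom at *
  split_ifs at * with h1
  · exact findAux_ge cs nd _ pos h
  · simp at h

lemma findFrom_match (cs nd : List Char) (pos : Nat) (hp : pos < cs.length)
    (hm : (cs.drop pos).take nd.length = nd) : findFrom cs nd pos = pos := by
  have hle : pos + nd.length ≤ cs.length := matchAt_le cs nd pos hp hm
  unfold findFrom
  rw [if_pos (by omega)]
  have : cs.length + 1 - pos = (cs.length - pos) + 1 := by omega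
  rw [this, findAux_match cs nd _ pos hle hm]

lemma findFrom_succ (cs nd : List Char) (i : Nat) (hi : i < cs.length)
    (hm : (cs.drop i).take nd.length ≠ nd) : findFrom cs nd i = findFrom cs nd (i+1) := by
  unfold findFrom
  rw [if_pos (by omega), if_pos (by omega)]
  have h1 : cs.length + 1 - i = (cs.length - i) + 1 := by omega
  have h2 : cs.length + 1 - (i+1) = cs.length - i := by omega
  rw [h1, h2, findAux_next cs nd _ i hm]

lemma quote_match (cs : List Char) (i : Nat) (hi : i < cs.length) :
    (cs.drop i).take 1 = ['"'] ↔ cs[i]'hi = '"' := by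
  have hd : cs.drop i = cs[i] :: cs.drop (i+1) := List.drop_eq_getElem_cons hi
  rw [hd, List.take_succ_cons, List.take_zero]
  simp

lemma loopB_ge (cs nd : List Char) (f i : Nat) (h : cs.length ≤ i) : loopB cs nd f i = -1 := by
  cases f with
  | zero => rfl
  | succ f =>
    by_cases hi : i ≤ cs.length
    · -- i = cs.length
      have hie : i = cs.length := by omega
      subst hie
      have hq : findFrom cs ['"'] cs.length = -1 := by
        unfold findFrom
        rw [if_pos (le_refl _)]
        exact findAux_out cs _ _ _ (by simp)
      by_cases hnd : nd = []
      · subst hnd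
        have hc : findFrom cs [] cs.length = (cs.length : Int) := by
          unfold findFrom
          rw [if_pos (le_refl _)]
          have : cs.length + 1 - cs.length = 0 + 1 := by omega
          rw [this]
          simp [findAux]
        simp [loopB, hq, hc]
      · have hc : findFrom cs nd cs.length = -1 := by
          unfold findFrom
          rw [if_pos (le_refl _)]
          exact findAux_out cs nd _ _ (by
            have : nd.length ≠ 0 := fun hl => hnd (List.length_eq_zero_iff.mp hl)
            omega)
        simp [loopB, hq, hc]
    · have hq : findFrom cs ['"'] i = -1 := by unfold findFrom; rw [if_neg (by omega)]
      have hc : findFrom cs nd i = -1 := by unfold findFrom; rw [if_neg (by omega)]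
      simp [loopB, hq, hc]

lemma loopA_fuel (cs nd : List Char) : ∀ k b i f f', cs.length + 1 - i ≤ k →
    cs.length + 1 - i ≤ f → cs.length + 1 - i ≤ f' → loopA cs nd f b i = loopA cs nd f' b i := by
  intro k
  induction k with
  | zero =>
    intro b i f f' hk _ _
    rw [loopA_ge cs nd f b i (by omega), loopA_ge cs nd f' b i (by omega)]
  | succ k ih =>
    intro b i f f' hk hf hf'
    by_cases hi : i < cs.length
    · obtain ⟨fa, rfl⟩ : ∃ fa, f = fa + 1 := ⟨f - 1, by omega⟩
      obtain ⟨fb, rfl⟩ : ∃ fb, f' = fb + 1 := ⟨f' - 1, by omega⟩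
      simp only [loopA, if_pos hi]
      split_ifs with h1 h2 h3 h4 h5
      · exact ih _ _ _ _ (by omega) (by omega) (by omega)
      · exact ih _ _ _ _ (by omega) (by omega) (by omega)
      · exact ih _ _ _ _ (by omega) (by omega) (by omega)
      · exact ih _ _ _ _ (by omega) (by omega) (by omega)
      · rfl
      · exact ih _ _ _ _ (by omega) (by omega) (by omega)
    · rw [loopA_ge cs nd _ b i (by omega), loopA_ge cs nd _ b i (by omega)]

-- A's in-string phase equals B's skipQ: from state (true, j), A resumes at the closing quote + 1.
lemma loopA_string (cs nd : List Char) : ∀ k j fA g, cs.length + 1 - j ≤ k →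
    cs.length + 1 - j ≤ fA → cs.length - j ≤ g →
    loopA cs nd fA true j =
      (if skipQ cs g j < cs.length then loopA cs nd (cs.length - skipQ cs g j) false (skipQ cs g j + 1) else -1) := by
  intro k
  induction k with
  | zero =>
    intro j fA g hk _ _
    have hj : cs.length ≤ j := by omega
    have hsk : skipQ cs g j = j := by
      cases g with
      | zero => rfl
      | succ g => simp [skipQ, show ¬ j < cs.length by omega]
    rw [hsk, if_neg (by omega), loopA_ge cs nd fA true j (by omega)]
  | succ k ih =>
    intro j fA g hk hfA hg
    by_cases hj : j < cs.length
    · obtain ⟨fa, rfl⟩ : ∃ fa, fA = fa + 1 := ⟨fA - 1, by omega⟩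
      obtain ⟨g0, rfl⟩ : ∃ g0, g = g0 + 1 := ⟨g - 1, by omega⟩
      by_cases h1 : cs[j]'hj = '\\' ∧ j + 1 < cs.length
      · have hA : loopA cs nd (fa+1) true j = loopA cs nd fa true (j+2) := by
          simp [loopA, hj, h1]
        have hS : skipQ cs (g0+1) j = skipQ cs g0 (j+2) := by
          simp [skipQ, hj, h1]
        rw [hA, hS]
        exact ih (j+2) fa g0 (by omega) (by omega) (by omega)
      · by_cases h2 : cs[j]'hj = '"'
        · have hA : loopA cs nd (fa+1) true j = loopA cs nd fa false (j+1) := by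
            simp [loopA, hj, h2]
          have hS : skipQ cs (g0+1) j = j := by
            simp [skipQ, hj, h2]
          rw [hA, hS, if_pos hj]
          exact loopA_fuel cs nd (cs.length + 1 - (j+1)) false (j+1) fa (cs.length - j) (le_refl _) (by omega) (by omega)
        · have hA : loopA cs nd (fa+1) true j = loopA cs nd fa true (j+1) := by
            simp [loopA, hj, h1, h2]
          have hS : skipQ cs (g0+1) j = skipQ cs g0 (j+1) := by
            simp [skipQ, hj, h1, h2]
          rw [hA, hS]
          exact ih (j+1) fa g0 (by omega) (by omega) (by omega)
    · have hsk : skipQ cs g j = j := by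
        cases g with
        | zero => rfl
        | succ g => simp [skipQ, show ¬ j < cs.length by omega]
      rw [hsk, if_neg (by omega), loopA_ge cs nd fA true j (by omega)]

-- one unquoted, non-matching position is transparent to B's loop
lemma loopB_step (cs nd : List Char) (i : Nat) (hi : i < cs.length)
    (hch : cs[i]'hi ≠ '"') (hm : (cs.drop i).take nd.length ≠ nd) (f : Nat) :
    loopB cs nd (f+1) i = loopB cs nd (f+1) (i+1) := by
  have hq : findFrom cs ['"'] i = findFrom cs ['"'] (i+1) := by
    apply findFrom_succ cs ['"'] i hi
    intro h
    exact hch ((quote_match cs i hi).mp (by simpa using h))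
  have hc : findFrom cs nd i = findFrom cs nd (i+1) := findFrom_succ cs nd i hi hm
  simp only [loopB, hq, hc]

-- main invariant: from an unquoted position, A's scan and B's region-jumping loop agree
lemma main_eq (cs nd : List Char) : ∀ k i fA fB, cs.length + 1 - i ≤ k →
    cs.length + 1 - i ≤ fA → cs.length + 1 - i ≤ fB →
    loopA cs nd fA false i = loopB cs nd fB i := by
  intro k
  induction k with
  | zero =>
    intro i fA fB hk _ _
    rw [loopA_ge cs nd fA false i (by omega), loopB_ge cs nd fB i (by omega)]
  | succ k ih =>
    intro i fA fB hk hfA hfB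
    by_cases hi : i < cs.length
    · obtain ⟨fa, rfl⟩ : ∃ fa, fA = fa + 1 := ⟨fA - 1, by omega⟩
      obtain ⟨fb, rfl⟩ : ∃ fb, fB = fb + 1 := ⟨fB - 1, by omega⟩
      by_cases hch : cs[i]'hi = '"'
      · -- enter a quoted string at i
        have hq : findFrom cs ['"'] i = (i : Int) := by
          apply findFrom_match cs ['"'] i hi
          simpa using (quote_match cs i hi).mpr hch
        have hA : loopA cs nd (fa+1) false i = loopA cs nd fa true (i+1) := by
          simp [loopA, hi, hch]
        rw [hA, loopA_string cs nd (cs.length + 1 - (i+1)) (i+1) fa (cs.length - i) (le_refl _) (by omega) (by omega)]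
        set j := skipQ cs (cs.length - i) (i+1) with hjdef
        have hjge : i + 1 ≤ j := skipQ_ge cs _ _
        have hBq : loopB cs nd (fb+1) i =
            (if j ≥ cs.length then -1 else loopB cs nd fb (j+1)) := by
          have hne : ¬ ((i : Int) = -1) := by omega
          have hqN : (if (i : Int) = -1 then cs.length else ((i : Int)).toNat) = i := by
            rw [if_neg hne, Int.toNat_natCast]
          have hcand : ¬ (findFrom cs nd i ≠ -1 ∧ findFrom cs nd i < ((i : Nat) : Int)) := by
            rintro ⟨hne2, hlt⟩
            have := findFrom_ge cs nd i hne2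
            omega
          simp only [loopB, hq, hqN]
          rw [if_neg hcand, if_neg (by omega)]
        rw [hBq]
        by_cases hjn : j < cs.length
        · rw [if_pos hjn, if_neg (by omega)]
          exact ih (j+1) (cs.length - j) fb (by omega) (by omega) (by omega)
        · rw [if_neg hjn, if_pos (by omega)]
      · by_cases hm : (cs.drop i).take nd.length = nd
        · -- match at i: both return i
          have hA : loopA cs nd (fa+1) false i = (i : Int) := by
            simp [loopA, hi, hch, hm]
          have hc : findFrom cs nd i = (i : Int) := findFrom_match cs nd i hi hm
          have hqge : findFrom cs ['"'] i = -1 ∨ (i+1 : Int) ≤ findFrom cs ['"'] i := by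
            by_cases hqn : findFrom cs ['"'] i = -1
            · exact Or.inl hqn
            · right
              have hstep : findFrom cs ['"'] i = findFrom cs ['"'] (i+1) := by
                apply findFrom_succ cs ['"'] i hi
                intro h
                exact hch ((quote_match cs i hi).mp (by simpa using h))
              rw [hstep] at hqn ⊢
              exact findFrom_ge cs ['"'] (i+1) hqn
          have hB : loopB cs nd (fb+1) i = (i : Int) := by
            simp only [loopB, hc]
            rw [if_pos]
            constructor
            · omega
            · rcases hqge with h | h
              · rw [if_pos h]; omega
              · rw [if_neg (by omega)]
                have : (0:Int) ≤ findFrom cs ['"'] i := by omega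
                rw [Int.toNat_of_nonneg this] at *
                omega
          rw [hA, hB]
        · -- no match, unquoted: both advance to i+1
          have hA : loopA cs nd (fa+1) false i = loopA cs nd fa false (i+1) := by
            simp [loopA, hi, hch, hm]
          rw [hA, loopB_step cs nd i hi hch hm fb]
          exact ih (i+1) fa (fb+1) (by omega) (by omega) (by omega)
    · rw [loopA_ge cs nd _ false i (by omega), loopB_ge cs nd _ i (by omega)]

-- ===== VERDICT (by name: the statement is the Claim_ definition above) =====
theorem find_unquoted_py_spec : Claim_equal_find_unquoted_py := by
  intro s needle _
  unfold Spec_find_unquoted_py find_unquoted_py find_unquoted_py_alt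
  exact main_eq s.toList needle.toList (s.toList.length + 1) 0 _ _ (by omega) (by omega) (by omega)
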